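-- pv_equiv track=rewrite | github.com/richstox/richstox | backend/tests/test_key_metrics_canonical.py | _make_quarterly_rows
-- ===== SOURCE A (Python) =====
-- def _make_quarterly_rows(ticker, quarters):
--     """Build a list of company_financials docs for quarterly data.
--
--     `quarters` is a list of dicts, each containing overrides for a single quarter.
--     Required key: "period_date".  All financial fields default to None.
--     """
--     rows = []
--     for q in quarters:
--         row = {
--             "ticker": ticker,
--             "period_type": "quarterly",
--             "period_date": q["period_date"],
--             "revenue": q.get("revenue"),
--             "cost_of_revenue": None,
--             "gross_profit": None,
--             "operating_income": None,
--             "operating_expenses": None,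
--             "net_income": q.get("net_income"),
--             "ebitda": q.get("ebitda"),
--             "ebit": None,
--             "interest_expense": None,
--             "income_tax_expense": None,
--             "diluted_eps": None,
--             "total_assets": None,
--             "total_liabilities": None,
--             "total_equity": None,
--             "total_debt": q.get("total_debt"),
--             "cash_and_equivalents": q.get("cash_and_equivalents"),
--             "short_term_investments": None,
--             "total_current_assets": None,
--             "total_current_liabilities": None,
--             "retained_earnings": None,
--             "operating_cash_flow": q.get("operating_cash_flow"),
--             "investing_cash_flow": None,
--             "financing_cash_flow": None,
--             "capital_expenditures": q.get("capital_expenditures"),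
--             "free_cash_flow": q.get("free_cash_flow"),
--             "dividends_paid": None,
--         }
--         rows.append(row)
--     return rows
-- ===== SOURCE B (Python) =====
-- # Columnar variant: build one column (list over all quarters) per field, then
-- # transpose the columns into per-quarter dicts — field-major instead of A's
-- # row-major construction.
-- ALL_FIELDS = [
--     "revenue", "cost_of_revenue", "gross_profit", "operating_income",
--     "operating_expenses", "net_income", "ebitda", "ebit", "interest_expense",
--     "income_tax_expense", "diluted_eps", "total_assets", "total_liabilities",
--     "total_equity", "total_debt", "cash_and_equivalents",
--     "short_term_investments", "total_current_assets",
--     "total_current_liabilities", "retained_earnings", "operating_cash_flow",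
--     "investing_cash_flow", "financing_cash_flow", "capital_expenditures",
--     "free_cash_flow", "dividends_paid",
-- ]
-- PASSTHROUGH = frozenset({
--     "revenue", "net_income", "ebitda", "total_debt", "cash_and_equivalents",
--     "operating_cash_flow", "capital_expenditures", "free_cash_flow",
-- })
--
-- def _make_quarterly_rows(ticker, quarters):
--     n = len(quarters)
--     columns = [
--         ("ticker", [ticker] * n),
--         ("period_type", ["quarterly"] * n),
--         ("period_date", [q["period_date"] for q in quarters]),
--     ]
--     for f in ALL_FIELDS:
--         col = [q.get(f) for q in quarters] if f in PASSTHROUGH else [None] * n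
--         columns.append((f, col))
--     return [{k: col[i] for k, col in columns} for i in range(n)]
-- ===== Notes on version B (the rewrite author's own statement) =====
-- stated objective: alternative
-- what changed: B builds the result column-wise: one list per field spanning all quarters (constant fields as replicated columns, passthrough fields as a map over quarters), then transposes the columns into per-quarter dicts, instead of A's row-wise loop appending a flat 29-entry dict literal per quarter.
import Mathlib
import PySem

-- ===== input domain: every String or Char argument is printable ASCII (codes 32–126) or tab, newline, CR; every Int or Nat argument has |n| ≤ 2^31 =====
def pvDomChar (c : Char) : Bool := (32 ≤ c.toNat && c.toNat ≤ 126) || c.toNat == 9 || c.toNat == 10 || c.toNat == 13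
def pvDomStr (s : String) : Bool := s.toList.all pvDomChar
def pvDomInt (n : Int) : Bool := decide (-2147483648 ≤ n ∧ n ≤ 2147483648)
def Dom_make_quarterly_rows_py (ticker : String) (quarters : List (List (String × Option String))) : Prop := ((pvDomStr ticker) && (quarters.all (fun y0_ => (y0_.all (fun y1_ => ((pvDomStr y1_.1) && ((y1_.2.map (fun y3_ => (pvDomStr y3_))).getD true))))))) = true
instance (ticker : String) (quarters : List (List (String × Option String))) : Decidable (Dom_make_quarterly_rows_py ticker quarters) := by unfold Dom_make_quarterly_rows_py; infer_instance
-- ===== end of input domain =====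

-- B builds the table column-wise (one list per field over all quarters) and transposes,
-- instead of A's row-wise loop over a flat dict literal; objective: alternative.

-- ===== PORT A =====
-- q.get(f)  (value type Option String; absent key gives Python None = none)
def pvGetA (q : List (String × Option String)) (f : String) : Option String :=
  ((PySem.Dict.mk q).get? f).getD none

-- q["period_date"]: raises KeyError when absent — those inputs are excluded by Pre_;
-- the port returns none there (outside Pre_ nothing is claimed).
def pvPd (q : List (String × Option String)) : Option String :=
  ((PySem.Dict.mk q).get? "period_date").getD none

def make_quarterly_rows_py (ticker : String) (quarters : List (List (String × Option String))) : List (List (String × Option String)) :=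
  quarters.foldl (fun rows q => rows ++ [[
    ("ticker", some ticker),
    ("period_type", some "quarterly"),
    ("period_date", pvPd q),
    ("revenue", pvGetA q "revenue"),
    ("cost_of_revenue", none),
    ("gross_profit", none),
    ("operating_income", none),
    ("operating_expenses", none),
    ("net_income", pvGetA q "net_income"),
    ("ebitda", pvGetA q "ebitda"),
    ("ebit", none),
    ("interest_expense", none),
    ("income_tax_expense", none),
    ("diluted_eps", none),
    ("total_assets", none),
    ("total_liabilities", none),
    ("total_equity", none),
    ("total_debt", pvGetA q "total_debt"),
    ("cash_and_equivalents", pvGetA q "cash_and_equivalents"),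
    ("short_term_investments", none),
    ("total_current_assets", none),
    ("total_current_liabilities", none),
    ("retained_earnings", none),
    ("operating_cash_flow", pvGetA q "operating_cash_flow"),
    ("investing_cash_flow", none),
    ("financing_cash_flow", none),
    ("capital_expenditures", pvGetA q "capital_expenditures"),
    ("free_cash_flow", pvGetA q "free_cash_flow"),
    ("dividends_paid", none)]]) []

-- ===== PORT B =====
def pvAllFields : List String :=
  ["revenue", "cost_of_revenue", "gross_profit", "operating_income",
   "operating_expenses", "net_income", "ebitda", "ebit", "interest_expense",
   "income_tax_expense", "diluted_eps", "total_assets", "total_liabilities",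
   "total_equity", "total_debt", "cash_and_equivalents",
   "short_term_investments", "total_current_assets",
   "total_current_liabilities", "retained_earnings", "operating_cash_flow",
   "investing_cash_flow", "financing_cash_flow", "capital_expenditures",
   "free_cash_flow", "dividends_paid"]

def pvPassthrough : PySem.Set String :=
  PySem.Set.ofList ["revenue", "net_income", "ebitda", "total_debt",
    "cash_and_equivalents", "operating_cash_flow", "capital_expenditures",
    "free_cash_flow"]

-- Source B's `columns` list: base columns plus the loop over ALL_FIELDS appending one column each
def pvColumns (ticker : String) (quarters : List (List (String × Option String))) : List (String × List (Option String)) :=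
  pvAllFields.foldl
    (fun cols f => cols ++ [(f,
      if pvPassthrough.contains f then quarters.map (fun q => pvGetA q f)
      else List.replicate quarters.length none)])
    [("ticker", List.replicate quarters.length (some ticker)),
     ("period_type", List.replicate quarters.length (some "quarterly")),
     ("period_date", quarters.map pvPd)]

-- the transpose: {k: col[i] for k, col in columns} for each i in range(n);
-- col[i] ported as List.getD (i < n holds for every column, so exact on the range)
def make_quarterly_rows_py_alt (ticker : String) (quarters : List (List (String × Option String))) : List (List (String × Option String)) :=
  (List.range quarters.length).map (fun i =>
    ((pvColumns ticker quarters).foldl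
      (fun d kc => d.insert kc.1 (kc.2.getD i none)) (PySem.Dict.mk [])).items)

-- ===== PRECONDITION & SPEC =====
-- Pre_ excludes quarters missing the "period_date" key, on which Python A raises KeyError.
def Pre_make_quarterly_rows_py (ticker : String) (quarters : List (List (String × Option String))) : Prop :=
  ∀ q ∈ quarters, "period_date" ∈ q.map Prod.fst
instance (ticker : String) (quarters : List (List (String × Option String))) : Decidable (Pre_make_quarterly_rows_py ticker quarters) := by unfold Pre_make_quarterly_rows_py; infer_instance

def pvWitness_make_quarterly_rows_py : String × (List (List (String × Option String))) :=
  ("AAPL", [[("period_date", some "2024-03-31"), ("revenue", some "100")]])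

def Spec_make_quarterly_rows_py (ticker : String) (quarters : List (List (String × Option String))) (out : List (List (String × Option String))) : Prop := out = make_quarterly_rows_py_alt ticker quarters
instance (ticker : String) (quarters : List (List (String × Option String))) (out : List (List (String × Option String))) : Decidable (Spec_make_quarterly_rows_py ticker quarters out) := by unfold Spec_make_quarterly_rows_py; infer_instance

-- ===== CLAIM (what is proved, stated in full; the proofs are below) =====
def Claim_equal_make_quarterly_rows_py : Prop := ∀ (ticker : String) (quarters : List (List (String × Option String))), Dom_make_quarterly_rows_py ticker quarters → Pre_make_quarterly_rows_py ticker quarters → Spec_make_quarterly_rows_py ticker quarters (make_quarterly_rows_py ticker quarters)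

-- ===== LEMMAS AND PROOFS =====
-- A's row for one quarter, as a plain list
def pvRowLit (ticker : String) (q : List (String × Option String)) : List (String × Option String) :=
  [("ticker", some ticker), ("period_type", some "quarterly"),
   ("period_date", pvPd q),
   ("revenue", pvGetA q "revenue"), ("cost_of_revenue", none),
   ("gross_profit", none), ("operating_income", none),
   ("operating_expenses", none), ("net_income", pvGetA q "net_income"),
   ("ebitda", pvGetA q "ebitda"), ("ebit", none),
   ("interest_expense", none), ("income_tax_expense", none),
   ("diluted_eps", none), ("total_assets", none),
   ("total_liabilities", none), ("total_equity", none),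
   ("total_debt", pvGetA q "total_debt"),
   ("cash_and_equivalents", pvGetA q "cash_and_equivalents"),
   ("short_term_investments", none), ("total_current_assets", none),
   ("total_current_liabilities", none), ("retained_earnings", none),
   ("operating_cash_flow", pvGetA q "operating_cash_flow"),
   ("investing_cash_flow", none), ("financing_cash_flow", none),
   ("capital_expenditures", pvGetA q "capital_expenditures"),
   ("free_cash_flow", pvGetA q "free_cash_flow"),
   ("dividends_paid", none)]

theorem foldl_append_singleton {α β : Type} (f : α → β) (l : List α) (acc : List β) :
    l.foldl (fun rows q => rows ++ [f q]) acc = acc ++ l.map f := by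
  induction l generalizing acc with
  | nil => simp
  | cons x xs ih => simp [List.foldl, ih]

theorem portA_eq_map (ticker : String) (quarters : List (List (String × Option String))) :
    make_quarterly_rows_py ticker quarters = quarters.map (pvRowLit ticker) := by
  unfold make_quarterly_rows_py
  simpa [pvRowLit] using foldl_append_singleton (pvRowLit ticker) quarters []

set_option maxHeartbeats 2000000 in
theorem rowB_eq (ticker : String) (quarters : List (List (String × Option String)))
    (i : Nat) (h : i < quarters.length) :
    ((pvColumns ticker quarters).foldl
      (fun d kc => d.insert kc.1 (kc.2.getD i none)) (PySem.Dict.mk [])).items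
      = pvRowLit ticker quarters[i] := by
  simp [pvColumns, pvAllFields, pvPassthrough, PySem.Set.ofList, PySem.Set.contains,
    PySem.Dict.items_insert, PySem.Dict.contains_insert, PySem.Dict.contains_mk,
    List.getD_eq_getElem?_getD, h, pvRowLit]

theorem make_quarterly_rows_py_spec' (ticker : String)
    (quarters : List (List (String × Option String))) :
    make_quarterly_rows_py ticker quarters = make_quarterly_rows_py_alt ticker quarters := by
  rw [portA_eq_map]
  unfold make_quarterly_rows_py_alt
  apply List.ext_getElem
  · simp
  · intro i h1 h2
    have hi : i < quarters.length := by simpa using h1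
    rw [List.getElem_map, List.getElem_map, List.getElem_range,
      rowB_eq ticker quarters i hi]

-- ===== VERDICT (by name: the statement is the Claim_ definition above) =====
theorem make_quarterly_rows_py_spec : Claim_equal_make_quarterly_rows_py := by
  intro ticker quarters _ _
  exact make_quarterly_rows_py_spec' ticker quarters
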